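-- pv_equiv track=rewrite | github.com/Shreeyoga/Checkers-game-using-AI-Algorithm-. | AI CHECKERS GAME 1.py | evaluate
-- ===== SOURCE A (Python) =====
-- WHITE = "w"
--
-- WHITE_KING = "W"
--
-- BLACK = "b"
--
-- BLACK_KING = "B"
--
-- def evaluate(board):
--     score = 0
--     for row in board:
--         for piece in row:
--             if piece == WHITE:
--                 score -= 1
--             elif piece == WHITE_KING:
--                 score -= 2
--             elif piece == BLACK:
--                 score += 1
--             elif piece == BLACK_KING:
--                 score += 2
--     return score
-- ===== SOURCE B (Python) =====
-- def evaluate(board):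
--     cells = [p for row in board for p in row]
--     return cells.count("b") + 2 * cells.count("B") - cells.count("w") - 2 * cells.count("W")
-- ===== Notes on version B (the rewrite author's own statement) =====
-- stated objective: simpler
-- what changed: Replaces the single accumulating loop with per-cell branching by a flatten step followed by four separate list.count scans combined in one closed-form arithmetic expression (no branching, no accumulator).
import Mathlib
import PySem

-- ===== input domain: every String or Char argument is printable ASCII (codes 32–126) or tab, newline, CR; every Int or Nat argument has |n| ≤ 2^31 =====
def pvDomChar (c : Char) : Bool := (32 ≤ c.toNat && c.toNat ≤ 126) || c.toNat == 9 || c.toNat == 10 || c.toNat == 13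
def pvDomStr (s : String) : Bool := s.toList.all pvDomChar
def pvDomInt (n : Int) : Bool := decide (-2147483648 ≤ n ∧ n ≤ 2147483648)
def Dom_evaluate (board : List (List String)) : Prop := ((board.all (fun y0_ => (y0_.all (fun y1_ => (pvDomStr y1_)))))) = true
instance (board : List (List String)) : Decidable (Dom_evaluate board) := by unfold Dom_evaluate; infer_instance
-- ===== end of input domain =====

-- B replaces A's per-cell branching accumulator by a flatten step plus four list.count scans combined arithmetically (simpler; same cost).
-- ===== PORT A =====
def evaluate (board : List (List String)) : Int :=
  board.foldl (fun score row =>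
    row.foldl (fun score piece =>
      if piece = "w" then score - 1
      else if piece = "W" then score - 2
      else if piece = "b" then score + 1
      else if piece = "B" then score + 2
      else score) score) 0

-- ===== PORT B =====
-- B: flatten the board, then combine four list.count scans in one closed form.
def evaluate_alt (board : List (List String)) : Int :=
  let cells := board.flatMap (fun row => row)
  (PySem.List.count cells "b" : Int) + 2 * (PySem.List.count cells "B" : Int)
    - (PySem.List.count cells "w" : Int) - 2 * (PySem.List.count cells "W" : Int)

-- ===== PRECONDITION & SPEC =====
def Spec_evaluate (board : List (List String)) (out : Int) : Prop := out = evaluate_alt board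
instance (board : List (List String)) (out : Int) : Decidable (Spec_evaluate board out) := by unfold Spec_evaluate; infer_instance

-- ===== CLAIM (what is proved, stated in full; the proofs are below) =====
def Claim_equal_evaluate : Prop := ∀ (board : List (List String)), Dom_evaluate board → Spec_evaluate board (evaluate board)

-- ===== LEMMAS AND PROOFS =====

-- value of a list of pieces under A's scoring
def pieceScore (xs : List String) : Int :=
  (xs.count "b" : Int) + 2 * (xs.count "B" : Int) - (xs.count "w" : Int) - 2 * (xs.count "W" : Int)

theorem foldl_pieces (xs : List String) (s : Int) :
    xs.foldl (fun score piece =>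
      if piece = "w" then score - 1
      else if piece = "W" then score - 2
      else if piece = "b" then score + 1
      else if piece = "B" then score + 2
      else score) s = s + pieceScore xs := by
  induction xs generalizing s with
  | nil => simp [pieceScore]
  | cons x xs ih =>
    simp only [List.foldl_cons, ih, pieceScore, List.count_cons]
    by_cases hw : x = "w" <;> by_cases hW : x = "W" <;> by_cases hb : x = "b" <;> by_cases hB : x = "B" <;>
      simp_all <;> push_cast <;> ring

theorem foldl_rows (board : List (List String)) (s : Int) :
    board.foldl (fun score row =>
      row.foldl (fun score piece =>
        if piece = "w" then score - 1
        else if piece = "W" then score - 2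
        else if piece = "b" then score + 1
        else if piece = "B" then score + 2
        else score) score) s = s + pieceScore (board.flatMap (fun row => row)) := by
  induction board generalizing s with
  | nil => simp [pieceScore]
  | cons r rs ih =>
    simp only [List.foldl_cons]
    rw [foldl_pieces, ih]
    simp only [List.flatMap_cons, pieceScore, List.count_append]
    push_cast; ring

-- ===== VERDICT =====
theorem evaluate_spec : Claim_equal_evaluate := by
  intro board _
  unfold Spec_evaluate evaluate evaluate_alt
  rw [foldl_rows]
  simp [PySem.List.count_eq, pieceScore]
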